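-- pv_equiv track=rewrite | github.com/a4lamber/Leetcode | leetcode/1196-how-many-apples-can-you-put-into-the-basket/1196-sort.py | maxNumberOfApples
-- ===== SOURCE A (Python) =====
-- from typing import List
--
-- def maxNumberOfApples(weight: List[int]) -> int:
--
--     # sort it, O(nlogn)
--     weight.sort()
--
--     appleCounter = 0
--     totalAppleWeight = 0
--
--     # traverse, O(n)
--     for singleAppleWeight in weight:
--         if totalAppleWeight + singleAppleWeight > 5000:
--             break
--
--         appleCounter += 1
--         totalAppleWeight += singleAppleWeight
--
--     return appleCounter
-- ===== SOURCE B (Python) =====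
-- from collections import Counter
--
-- def maxNumberOfApples(weight):
--     # Group equal weights with a Counter and take whole groups at once:
--     # sort only the distinct weights; for each positive weight take
--     # min(count, remaining_capacity // w) copies by division instead of
--     # walking the elements one by one.  (Does not mutate its argument.)
--     cnt = Counter(weight)
--     total = 0
--     picked = 0
--     for w in sorted(cnt):
--         c = cnt[w]
--         if w <= 0:
--             picked += c
--             total += w * c
--         else:
--             k = min(c, (5000 - total) // w)
--             picked += k
--             total += w * k
--             if k < c:
--                 break
--     return picked
-- ===== Notes on version B (the rewrite author's own statement) =====
-- stated objective: alternative
-- what changed: B replaces sort-all-elements-then-walk-one-by-one with a Counter grouping: it sorts only the distinct weights and takes each whole group at once via min(count, remaining//w), so the per-element greedy loop disappears; B does not mutate its argument (A sorts it in place).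
import Mathlib
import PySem

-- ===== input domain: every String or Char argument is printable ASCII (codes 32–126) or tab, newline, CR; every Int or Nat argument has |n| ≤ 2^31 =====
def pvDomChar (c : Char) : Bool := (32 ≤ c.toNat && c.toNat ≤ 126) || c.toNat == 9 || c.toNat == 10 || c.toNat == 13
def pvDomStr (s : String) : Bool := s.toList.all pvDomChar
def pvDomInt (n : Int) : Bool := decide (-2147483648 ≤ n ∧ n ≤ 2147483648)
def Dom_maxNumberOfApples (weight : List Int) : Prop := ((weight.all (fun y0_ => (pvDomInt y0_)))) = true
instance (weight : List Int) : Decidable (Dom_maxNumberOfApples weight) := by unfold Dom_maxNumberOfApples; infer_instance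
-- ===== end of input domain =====

-- B groups equal weights with a Counter and, per distinct weight in ascending order,
-- takes a whole group at once by division, instead of sorting all elements and walking
-- them one by one; return value only (A sorts its argument in place, B does not mutate it).

-- ===== PORT A =====
-- the for-loop with break: counter c, running total t
def pvLoopA : List Int → Int → Int → Int
  | [], c, _ => c
  | x :: xs, c, t => if t + x > 5000 then c else pvLoopA xs (c + 1) (t + x)

def maxNumberOfApples (weight : List Int) : Int :=
  pvLoopA (PySem.List.sorted weight (fun x => x) false) 0 0

-- ===== PORT B =====
-- the for-loop over the sorted distinct weights: total t, picked p
def pvLoopB : List Int → PySem.Dict Int Int → Int → Int → Int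
  | [], _, _, p => p
  | w :: ws, cnt, t, p =>
    let c := cnt.getD w 0
    if w ≤ 0 then
      pvLoopB ws cnt (t + w * c) (p + c)
    else
      let k := min c (PySem.Int.floordiv (5000 - t) w)
      if k < c then p + k else pvLoopB ws cnt (t + w * k) (p + k)

def maxNumberOfApples_alt (weight : List Int) : Int :=
  let cnt := PySem.Dict.counter weight
  pvLoopB (PySem.List.sorted cnt.keys (fun x => x) false) cnt 0 0

-- ===== PRECONDITION & SPEC =====
def Spec_maxNumberOfApples (weight : List Int) (out : Int) : Prop := out = maxNumberOfApples_alt weight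
instance (weight : List Int) (out : Int) : Decidable (Spec_maxNumberOfApples weight out) := by unfold Spec_maxNumberOfApples; infer_instance

-- ===== CLAIM (what is proved, stated in full; the proofs are below) =====
def Claim_equal_maxNumberOfApples : Prop := ∀ (weight : List Int), Dom_maxNumberOfApples weight → Spec_maxNumberOfApples weight (maxNumberOfApples weight)

-- ===== LEMMAS AND PROOFS =====

-- A's loop over a block of n equal non-positive weights never breaks
theorem pvLoopA_replicate_nonpos (w : Int) (hw : w ≤ 0) (n : Nat) :
    ∀ (rest : List Int) (p t : Int), t ≤ 5000 →
    pvLoopA (List.replicate n w ++ rest) p t = pvLoopA rest (p + n) (t + w * n) := by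
  induction n with
  | zero => intro rest p t ht; simp
  | succ n ih =>
    intro rest p t ht
    have hbr : ¬ (t + w > 5000) := by omega
    simp only [List.replicate_succ, List.cons_append, pvLoopA, if_neg hbr]
    rw [ih rest (p + 1) (t + w) (by omega)]
    push_cast; ring_nf

-- A's loop over a block of n equal positive weights = the division arithmetic
theorem pvLoopA_replicate_pos (w : Int) (hw : 0 < w) (n : Nat) :
    ∀ (rest : List Int) (p t : Int), t ≤ 5000 →
    pvLoopA (List.replicate n w ++ rest) p t =
      (let k := min (n : Int) (PySem.Int.floordiv (5000 - t) w);
       if k < (n : Int) then p + k else pvLoopA rest (p + n) (t + w * n)) := by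
  induction n with
  | zero =>
    intro rest p t ht
    have hq : (0:Int) ≤ PySem.Int.floordiv (5000 - t) w := by
      rw [PySem.Int.floordiv_eq_ediv_of_pos hw]; exact Int.ediv_nonneg (by omega) (by omega)
    simp only [List.replicate_zero, List.nil_append, Nat.cast_zero]
    rw [min_eq_left hq, if_neg (lt_irrefl 0)]
    simp
  | succ n ih =>
    intro rest p t ht
    by_cases hbr : t + w > 5000
    · -- breaks immediately; the quotient is 0
      have hq : PySem.Int.floordiv (5000 - t) w = 0 := by
        rw [PySem.Int.floordiv_eq_iff_of_pos hw]; constructor <;> omega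
      have hmin : min ((n + 1 : Nat) : Int) (0:Int) = 0 := by
        rw [min_eq_right]; push_cast; omega
      simp only [List.replicate_succ, List.cons_append, pvLoopA, if_pos hbr, hq, hmin]
      rw [if_pos (by push_cast; omega)]
      omega
    · have hq1 : (1:Int) ≤ PySem.Int.floordiv (5000 - t) w := by
        rw [PySem.Int.le_floordiv_iff_mul_le hw]; omega
      have hqs : PySem.Int.floordiv (5000 - (t + w)) w = PySem.Int.floordiv (5000 - t) w - 1 := by
        rw [PySem.Int.floordiv_eq_ediv_of_pos hw, PySem.Int.floordiv_eq_ediv_of_pos hw]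
        have heq : 5000 - (t + w) = 5000 - t + (-1) * w := by ring
        rw [heq, Int.add_mul_ediv_right _ _ (by omega)]
        omega
      simp only [List.replicate_succ, List.cons_append, pvLoopA, if_neg hbr]
      rw [ih rest (p + 1) (t + w) (by omega)]
      simp only [hqs]
      set q := PySem.Int.floordiv (5000 - t) w with hqdef
      have hmins : min ((n : Int)) (q - 1) + 1 = min ((n + 1 : Nat) : Int) q := by
        push_cast; omega
      by_cases hk : min ((n : Int)) (q - 1) < (n : Int)
      · rw [if_pos hk, if_pos (by push_cast at hmins ⊢; omega)]
        push_cast at hmins ⊢; omega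
      · rw [if_neg hk, if_neg (by push_cast at hmins ⊢; omega)]
        have harg1 : p + 1 + (n : Int) = p + ((n + 1 : Nat) : Int) := by push_cast; ring
        have harg2 : t + w + w * (n : Int) = t + w * ((n + 1 : Nat) : Int) := by push_cast; ring
        rw [harg1, harg2]

-- A's loop over the grouped sorted list = B's loop over the sorted distinct weights
theorem pvLoopA_flatMap_eq_pvLoopB (weight : List Int) :
    ∀ (ks : List Int) (t p : Int), t ≤ 5000 →
    pvLoopA (ks.flatMap (fun w => List.replicate (weight.count w) w)) p t =
      pvLoopB ks (PySem.Dict.counter weight) t p := by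
  intro ks
  induction ks with
  | nil => intro t p ht; rfl
  | cons w ws ih =>
    intro t p ht
    have hc : (PySem.Dict.counter weight).getD w 0 = (weight.count w : Int) :=
      PySem.Dict.getD_counter weight w
    simp only [List.flatMap_cons, pvLoopB, hc]
    by_cases hw : w ≤ 0
    · rw [if_pos hw, pvLoopA_replicate_nonpos w hw _ _ p t ht]
      exact ih (t + w * (weight.count w : Int)) (p + (weight.count w : Int))
        (by nlinarith [Int.natCast_nonneg (weight.count w)])
    · have hwpos : 0 < w := by omega
      rw [if_neg hw, pvLoopA_replicate_pos w hwpos _ _ p t ht]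
      set q := PySem.Int.floordiv (5000 - t) w with hqdef
      set c : Int := (weight.count w : Int) with hcdef
      by_cases hk : min c q < c
      · rw [if_pos hk, if_pos hk]
      · have hkc : min c q = c := by omega
        rw [if_neg hk, if_neg hk, hkc]
        have hcq : c ≤ q := by omega
        have : c * w ≤ 5000 - t := by
          rw [hqdef] at hcq
          exact (PySem.Int.le_floordiv_iff_mul_le hwpos).mp hcq
        exact ih (t + w * c) (p + c) (by nlinarith)

-- counting elements of the grouped list
theorem count_flatMap_replicate (weight : List Int) :
    ∀ (ks : List Int), ks.Nodup → ∀ (x : Int),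
    (ks.flatMap (fun w => List.replicate (weight.count w) w)).count x =
      if x ∈ ks then weight.count x else 0 := by
  intro ks
  induction ks with
  | nil => intro _ x; simp
  | cons w ws ih =>
    intro hnd x
    rcases List.nodup_cons.mp hnd with ⟨hwmem, hnd'⟩
    simp only [List.flatMap_cons, List.count_append, List.count_replicate, ih hnd' x,
      List.mem_cons]
    by_cases hx : x = w
    · subst hx
      simp [hwmem]
    · simp only [hx]
      by_cases hxm : x ∈ ws
      · simp [hxm, Ne.symm hx]
      · simp [hxm, Ne.symm hx]

-- the grouped list is pairwise ≤ when the keys are pairwise <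
theorem pairwise_flatMap_replicate (cnt : Int → Nat) :
    ∀ (ks : List Int), ks.Pairwise (· < ·) →
    (ks.flatMap (fun w => List.replicate (cnt w) w)).Pairwise (· ≤ ·) := by
  intro ks
  induction ks with
  | nil => intro _; simp
  | cons w ws ih =>
    intro hp
    rcases List.pairwise_cons.mp hp with ⟨hw, hp'⟩
    simp only [List.flatMap_cons]
    rw [List.pairwise_append]
    refine ⟨List.pairwise_replicate.mpr (by simp), ih hp', ?_⟩
    intro a ha b hb
    have ha' := List.eq_of_mem_replicate ha
    rcases List.mem_flatMap.mp hb with ⟨w', hw', hb'⟩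
    have hb'' := List.eq_of_mem_replicate hb'
    rw [ha', hb'']
    exact le_of_lt (hw w' hw')

-- sorted(weight) is exactly the grouped list over the sorted distinct weights
theorem sorted_eq_flatMap (weight : List Int) :
    PySem.List.sorted weight (fun x => x) false =
      (PySem.List.sorted (PySem.Set.ofList weight) (fun x => x) false).flatMap
        (fun w => List.replicate (weight.count w) w) := by
  have hlt : (PySem.List.sorted (PySem.Set.ofList weight) (fun x => x) false).Pairwise (· < ·) :=
    PySem.List.sorted_ofList_pairwise_lt weight
  have hnd : (PySem.List.sorted (PySem.Set.ofList weight) (fun x => x) false).Nodup :=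
    hlt.imp (fun h => ne_of_lt h)
  apply PySem.List.sorted_id_eq_of_perm_of_pairwise
  · rw [List.perm_iff_count]
    intro x
    rw [count_flatMap_replicate weight _ hnd x]
    by_cases hx : x ∈ weight
    · rw [if_pos (by simp [PySem.List.mem_sorted, PySem.Set.mem_ofList, hx])]
    · rw [if_neg (by simp [PySem.List.mem_sorted, PySem.Set.mem_ofList, hx]),
        List.count_eq_zero_of_not_mem hx]
  · exact pairwise_flatMap_replicate _ _ hlt

-- ===== VERDICT (by name: the statement is the Claim_ definition above) =====
theorem maxNumberOfApples_spec : Claim_equal_maxNumberOfApples := by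
  intro weight _
  show maxNumberOfApples weight = maxNumberOfApples_alt weight
  unfold maxNumberOfApples maxNumberOfApples_alt
  show pvLoopA (PySem.List.sorted weight (fun x => x) false) 0 0 =
    pvLoopB (PySem.List.sorted (PySem.Dict.counter weight).keys (fun x => x) false)
      (PySem.Dict.counter weight) 0 0
  rw [sorted_eq_flatMap weight, PySem.Dict.keys_counter]
  exact pvLoopA_flatMap_eq_pvLoopB weight _ 0 0 (by omega)
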